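-- pv_equiv track=rewrite | github.com/dfint/df-translation-toolkit | df_translation_toolkit/parse/parse_raws.py | iterate_tags
-- ===== SOURCE A (Python) =====
-- from collections.abc import Callable, Iterable, Iterator, Mapping, Sequence
--
-- def iterate_tags(s: str) -> Iterator[str]:
--     tag_start = None
--     for i, char in enumerate(s):
--         if tag_start is None:
--             if char == "[":
--                 tag_start = i
--         elif char == "]":
--             yield s[tag_start : i + 1]
--             tag_start = None
-- ===== SOURCE B (Python) =====
-- def iterate_tags(s: str):
--     i = 0
--     while True:
--         i = s.find("[", i)
--         if i < 0:
--             return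
--         j = s.find("]", i + 1)
--         if j < 0:
--             return
--         yield s[i : j + 1]
--         i = j + 1
-- ===== Notes on version B (the rewrite author's own statement) =====
-- stated objective: faster
-- what changed: Replaces the per-character state-machine loop with repeated str.find jumps: find the next '[' and the first ']' after it and slice, skipping uninteresting characters at C speed.
import Mathlib
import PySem

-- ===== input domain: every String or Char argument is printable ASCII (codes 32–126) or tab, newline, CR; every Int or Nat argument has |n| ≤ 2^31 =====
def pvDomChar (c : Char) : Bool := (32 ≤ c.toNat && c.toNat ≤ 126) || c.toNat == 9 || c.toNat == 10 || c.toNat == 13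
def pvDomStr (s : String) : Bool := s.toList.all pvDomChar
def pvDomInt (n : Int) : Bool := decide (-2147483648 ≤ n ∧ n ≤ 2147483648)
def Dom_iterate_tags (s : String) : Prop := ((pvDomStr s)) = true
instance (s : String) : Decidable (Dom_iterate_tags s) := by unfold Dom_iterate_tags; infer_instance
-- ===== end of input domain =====

-- B replaces A's per-character state machine by repeated str.find jumps (find '[' then the first ']' after it, slice);
-- same yielded tags in the same order, a constant-factor speedup in Python. (Both are generators; equivalence is about list(...).)

-- ===== PORT A =====
def pvStepA (s : String) (st : List String × Option Int) (p : Int × Char) : List String × Option Int :=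
  match st.2 with
  | none => if p.2 = '[' then (st.1, some p.1) else st
  | some t => if p.2 = ']' then (st.1 ++ [PySem.Str.slice s (some t) (some (p.1 + 1))], none) else st

def iterate_tags (s : String) : List String :=
  ((PySem.List.enumerate s.toList 0).foldl (pvStepA s) ([], none)).1

-- ===== PORT B =====
-- fuel bounds the `while True` loop; each iteration advances the search start by ≥ 2, so s.toList.length + 1 is never exhausted
def pvAltLoop (s : String) (i : Int) : Nat → List String
  | 0 => []
  | Nat.succ fuel =>
    let i' := PySem.Str.findFrom s "[" i
    if i' < 0 then []
    else
      let j := PySem.Str.findFrom s "]" (i' + 1)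
      if j < 0 then []
      else PySem.Str.slice s (some i') (some (j + 1)) :: pvAltLoop s (j + 1) fuel

def iterate_tags_alt (s : String) : List String := pvAltLoop s 0 (s.toList.length + 1)

-- ===== PRECONDITION & SPEC =====
def Spec_iterate_tags (s : String) (out : List String) : Prop := out = iterate_tags_alt s
instance (s : String) (out : List String) : Decidable (Spec_iterate_tags s out) := by unfold Spec_iterate_tags; infer_instance

-- ===== CLAIM (what is proved, stated in full; the proofs are below) =====
def Claim_equal_iterate_tags : Prop := ∀ (s : String), Dom_iterate_tags s → Spec_iterate_tags s (iterate_tags s)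

-- ===== LEMMAS AND PROOFS =====

theorem pv_skip_none (s : String) (l : List Char) (k : Int) (acc : List String)
    (h : '[' ∉ l) :
    (PySem.List.enumerate l k).foldl (pvStepA s) (acc, none) = (acc, none) := by
  induction l generalizing k with
  | nil => simp [PySem.List.enumerate_nil]
  | cons c cs ih =>
    simp only [List.mem_cons, not_or] at h
    simp [PySem.List.enumerate_cons, pvStepA, Ne.symm h.1, ih _ h.2]

theorem pv_skip_some (s : String) (l : List Char) (k t : Int) (acc : List String)
    (h : ']' ∉ l) :
    (PySem.List.enumerate l k).foldl (pvStepA s) (acc, some t) = (acc, some t) := by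
  induction l generalizing k with
  | nil => simp [PySem.List.enumerate_nil]
  | cons c cs ih =>
    simp only [List.mem_cons, not_or] at h
    simp [PySem.List.enumerate_cons, pvStepA, Ne.symm h.1, ih _ h.2]

theorem pv_singleton_prefix (c : Char) (l : List Char) : [c] <+: l ↔ l.head? = some c := by
  cases l <;> simp [List.cons_prefix_iff]

theorem pv_singleton_infix (c : Char) (l : List Char) : [c] <:+: l ↔ c ∈ l := by
  constructor
  · rintro ⟨p, sfx, rfl⟩; simp
  · intro h; obtain ⟨a, b, rfl⟩ := List.append_of_mem h; exact ⟨a, b, by simp⟩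

theorem pv_not_mem_take (cs : List Char) (c : Char) (k p : Nat)
    (h : ∀ i, k ≤ i → i < p → ¬ [c] <+: cs.drop i) : c ∉ (cs.drop k).take (p - k) := by
  intro hmem
  obtain ⟨m, hm, hget⟩ := List.mem_iff_getElem.mp hmem
  have hm1 : m < p - k ∧ m < cs.length - k := by
    simp only [List.length_take, List.length_drop, lt_min_iff] at hm
    omega
  obtain ⟨hm1, hm2⟩ := hm1
  rw [List.getElem_take, List.getElem_drop] at hget
  apply h (k + m) (by omega) (by omega)
  rw [pv_singleton_prefix, List.head?_drop, List.getElem?_eq_getElem (by omega), hget]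

theorem pv_main (s : String) : ∀ (fuel k : Nat) (acc : List String),
    k ≤ s.toList.length → s.toList.length + 1 - k ≤ fuel →
    ((PySem.List.enumerate (s.toList.drop k) (k : Int)).foldl (pvStepA s) (acc, none)).1
      = acc ++ pvAltLoop s (k : Int) fuel := by
  intro fuel
  induction fuel with
  | zero => intro k acc hk hfu; exact absurd hfu (by omega)
  | succ fuel ih =>
    intro k acc hk hfu
    rw [pvAltLoop]
    simp only [PySem.Str.findFrom_eq]
    rw [show "[".toList = ['['] from rfl, show "]".toList = [']'] from rfl]
    by_cases hneg : PySem.Chars.findFrom s.toList ['['] ↑k none = -1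
    · have hni : ¬ ['['] <:+: s.toList.drop k :=
        (PySem.Chars.findFrom_natCast_eq_neg_one_iff _ _ k hk).mp hneg
      have hnm : '[' ∉ s.toList.drop k := fun h => hni ((pv_singleton_infix _ _).mpr h)
      rw [pv_skip_none s _ _ acc hnm, hneg]
      simp
    · obtain ⟨hle, hpre, hmin⟩ := PySem.Chars.findFrom_natCast_spec _ _ k hk hneg
      set f := PySem.Chars.findFrom s.toList ['['] ↑k none with hfdef
      have h0f : (0 : Int) ≤ f := le_trans (Int.natCast_nonneg k) hle
      have hfp : f = ↑f.toNat := (Int.toNat_of_nonneg h0f).symm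
      set p := f.toNat with hpdef
      have hkp : k ≤ p := by omega
      obtain ⟨t, ht, -⟩ := List.cons_prefix_iff.mp hpre
      have hplt : p < s.toList.length := by
        have := congrArg List.length ht
        simp only [List.length_drop, List.length_cons] at this
        omega
      have hdecomp : s.toList.drop k = (s.toList.drop k).take (p - k) ++ s.toList.drop p := by
        conv_lhs => rw [← List.take_append_drop (p - k) (s.toList.drop k)]
        rw [List.drop_drop]
        congr 2
        omega
      have hlen1 : ((s.toList.drop k).take (p - k)).length = p - k := by
        simp only [List.length_take, List.length_drop]
        omega
      have hnm1 : '[' ∉ (s.toList.drop k).take (p - k) := pv_not_mem_take _ _ k p hmin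
      rw [hdecomp, PySem.List.enumerate_append, List.foldl_append,
        pv_skip_none s _ _ acc hnm1, hlen1,
        show ((k : Int) + ↑(p - k)) = (p : Int) by omega,
        ht, PySem.List.enumerate_cons, List.foldl_cons,
        show pvStepA s (acc, none) ((p : Int), '[') = (acc, some (p : Int)) by simp [pvStepA]]
      have htt : t = s.toList.drop (p + 1) := by
        have h2 := List.tail_drop (l := s.toList) (i := p)
        rw [ht] at h2
        simpa using h2
      rw [hfp,
        show ((p : Int) + 1) = ((p + 1 : Nat) : Int) by omega,
        if_neg (by omega : ¬ ((p : Int) < 0))]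
      have hk2 : p + 1 ≤ s.toList.length := hplt
      by_cases hneg2 : PySem.Chars.findFrom s.toList [']'] ↑(p + 1) none = -1
      · have hni2 : ¬ [']'] <:+: s.toList.drop (p + 1) :=
          (PySem.Chars.findFrom_natCast_eq_neg_one_iff _ _ (p + 1) hk2).mp hneg2
        have hnm2 : ']' ∉ t := by
          rw [htt]; exact fun h => hni2 ((pv_singleton_infix _ _).mpr h)
        rw [pv_skip_some s _ _ _ acc hnm2, hneg2]
        simp
      · obtain ⟨hle2, hpre2, hmin2⟩ := PySem.Chars.findFrom_natCast_spec _ _ (p + 1) hk2 hneg2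
        set g := PySem.Chars.findFrom s.toList [']'] ↑(p + 1) none with hgdef
        have h0g : (0 : Int) ≤ g := le_trans (Int.natCast_nonneg (p + 1)) hle2
        have hgq : g = ↑g.toNat := (Int.toNat_of_nonneg h0g).symm
        set q := g.toNat with hqdef
        have hpq : p + 1 ≤ q := by omega
        obtain ⟨u, hu, -⟩ := List.cons_prefix_iff.mp hpre2
        have hqlt : q < s.toList.length := by
          have := congrArg List.length hu
          simp only [List.length_drop, List.length_cons] at this
          omega
        have hdecomp2 : t = t.take (q - (p + 1)) ++ s.toList.drop q := by
          conv_lhs => rw [← List.take_append_drop (q - (p + 1)) t]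
          rw [htt, List.drop_drop]
          congr 2
          omega
        have hlen2 : (t.take (q - (p + 1))).length = q - (p + 1) := by
          rw [htt]
          simp only [List.length_take, List.length_drop]
          omega
        have hnm2 : ']' ∉ t.take (q - (p + 1)) := by
          rw [htt]; exact pv_not_mem_take _ _ (p + 1) q hmin2
        rw [hdecomp2, PySem.List.enumerate_append, List.foldl_append,
          pv_skip_some s _ _ _ acc hnm2, hlen2,
          show (((p + 1 : Nat) : Int) + ↑(q - (p + 1))) = (q : Int) by omega,
          hu, PySem.List.enumerate_cons, List.foldl_cons,
          show pvStepA s (acc, some (p : Int)) ((q : Int), ']')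
            = (acc ++ [PySem.Str.slice s (some (p : Int)) (some ((q : Int) + 1))], none) by
              simp [pvStepA]]
        have huu : u = s.toList.drop (q + 1) := by
          have h2 := List.tail_drop (l := s.toList) (i := q)
          rw [hu] at h2
          simpa using h2
        rw [huu, hgq,
          show ((q : Int) + 1) = ((q + 1 : Nat) : Int) by omega,
          if_neg (by omega : ¬ ((q : Int) < 0)),
          ih (q + 1) (acc ++ [PySem.Str.slice s (some (p : Int)) (some ((q + 1 : Nat) : Int))])
            (by omega) (by omega)]
        simp

-- ===== VERDICT (by name: the statement is the Claim_ definition above) =====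
theorem iterate_tags_spec : Claim_equal_iterate_tags := by
  intro s _
  unfold Spec_iterate_tags iterate_tags iterate_tags_alt
  have h := pv_main s (s.toList.length + 1) 0 [] (Nat.zero_le _) (by omega)
  simpa using h
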